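-- pv_equiv track=rewrite | github.com/arash-shahmansoori/precept-framework | scripts/fix_formatting_v2.py | fix_tables
-- ===== SOURCE A (Python) =====
-- def fix_tables(lines):
--     """Wrap ALL tables in resizebox to prevent overflow."""
--     result = []
--     i = 0
--     while i < len(lines):
--         line = lines[i]
--
--         # Detect \begin{tabular}
--         if r'\begin{tabular}' in line.strip():
--             # Check if already wrapped in resizebox
--             already_wrapped = False
--             if len(result) > 0 and 'resizebox' in result[-1]:
--                 already_wrapped = True
--
--             if not already_wrapped:
--                 # Insert resizebox wrapper
--                 result.append(r'\resizebox{\textwidth}{!}{%')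
--                 result.append(line)
--                 i += 1
--                 # Find matching \end{tabular}
--                 depth = 1
--                 while i < len(lines):
--                     result.append(lines[i])
--                     if r'\begin{tabular}' in lines[i]:
--                         depth += 1
--                     if r'\end{tabular}' in lines[i]:
--                         depth -= 1
--                         if depth == 0:
--                             result.append('}%')  # Close resizebox
--                             i += 1
--                             break
--                     i += 1
--                 continue
--             else:
--                 result.append(line)
--                 i += 1
--                 continue
--
--         result.append(line)
--         i += 1
--
--     return result
-- ===== SOURCE B (Python) =====
-- def _find_spans(lines):
--     """Pass 1: (start, end) index spans of top-level tabular blocks to wrap; end is None if unterminated."""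
--     spans = []
--     n = len(lines)
--     i = 0
--     prev_close = -2  # index of the line right after which a '}%' was emitted
--     while i < n:
--         if r'\begin{tabular}' in lines[i].strip():
--             if i > 0 and prev_close != i - 1 and 'resizebox' in lines[i - 1]:
--                 i += 1  # already wrapped
--                 continue
--             depth = 1
--             j = i + 1
--             while j < n:
--                 if r'\begin{tabular}' in lines[j]:
--                     depth += 1
--                 if r'\end{tabular}' in lines[j]:
--                     depth -= 1
--                     if depth == 0:
--                         break
--                 j += 1
--             if j < n:
--                 spans.append((i, j))
--                 prev_close = j
--                 i = j + 1
--             else: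
--                 spans.append((i, None))
--                 i = n
--         else:
--             i += 1
--     return spans
--
--
-- def fix_tables(lines):
--     """Wrap ALL tables in resizebox to prevent overflow."""
--     out = []
--     pos = 0
--     for s, e in _find_spans(lines):
--         out.extend(lines[pos:s])
--         out.append(r'\resizebox{\textwidth}{!}{%')
--         if e is None:
--             out.extend(lines[s:])
--             return out
--         out.extend(lines[s:e + 1])
--         out.append('}%')
--         pos = e + 1
--     out.extend(lines[pos:])
--     return out
-- ===== Notes on version B (the rewrite author's own statement) =====
-- stated objective: alternative
-- what changed: A streams line-by-line with an outer while loop and a nested inner while that copies block lines and checks result[-1] for 'resizebox'; B first builds a span table of (start, end) indices of top-level tabular blocks to wrap (tracking the index of the last emitted '}%' to reproduce the already-wrapped check via lines[i-1]) and then rebuilds the output from slices of the input around those spans.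
import Mathlib
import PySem

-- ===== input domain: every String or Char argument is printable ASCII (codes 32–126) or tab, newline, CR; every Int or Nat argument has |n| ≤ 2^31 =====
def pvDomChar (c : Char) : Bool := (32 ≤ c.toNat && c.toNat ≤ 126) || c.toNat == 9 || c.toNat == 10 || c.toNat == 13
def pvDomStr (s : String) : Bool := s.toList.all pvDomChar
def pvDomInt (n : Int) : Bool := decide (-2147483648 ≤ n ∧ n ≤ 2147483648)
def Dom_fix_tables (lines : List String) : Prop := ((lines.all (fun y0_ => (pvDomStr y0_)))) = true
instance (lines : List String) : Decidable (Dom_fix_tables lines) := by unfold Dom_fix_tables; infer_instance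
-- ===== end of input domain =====

-- B replaces A's streaming scan (nested while loops appending to `result`) by a two-pass
-- span-table decomposition: pass 1 records (start, end) index spans of the tabular blocks
-- to wrap, pass 2 rebuilds the output from slices of the input around those spans
-- (objective: alternative decomposition, same asymptotic cost).

-- ===== PORT A =====
def pvBEGIN : String := "\\begin{tabular}"
def pvEND : String := "\\end{tabular}"
def pvWRAP : String := "\\resizebox{\\textwidth}{!}{%"
def pvRESIZE : String := "resizebox"
def pvCLOSE : String := "}%"

/-- A's inner `while` loop: appends lines to `res` until the matching `\end{tabular}`;
    returns the new result and the remaining (unconsumed) lines. -/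
def fixTablesInner : List String → List String → Int → (List String × List String)
  | [], res, _ => (res, [])
  | l :: rest, res, depth =>
    let res := res ++ [l]
    let depth := if PySem.Str.isIn pvBEGIN l then depth + 1 else depth
    if PySem.Str.isIn pvEND l then
      if depth - 1 = 0 then (res ++ [pvCLOSE], rest)
      else fixTablesInner rest res (depth - 1)
    else fixTablesInner rest res depth

/-- A's outer `while` loop over the remaining lines, carrying `result`; the fuel
    (one unit per outer iteration, `lines.length` is enough since every iteration
    consumes at least one line) only makes the recursion structural. -/
def fixTablesOuter : Nat → List String → List String → List String
  | 0, _, res => res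
  | _ + 1, [], res => res
  | fuel + 1, line :: rest, res =>
    if PySem.Str.isIn pvBEGIN (PySem.Str.strip line) then
      -- already wrapped iff the previously emitted line contains 'resizebox'
      if decide (0 < res.length) && PySem.Str.isIn pvRESIZE (res.getLast?.getD "") then
        fixTablesOuter fuel rest (res ++ [line])
      else
        let p := fixTablesInner rest (res ++ [pvWRAP, line]) 1
        fixTablesOuter fuel p.2 p.1
    else
      fixTablesOuter fuel rest (res ++ [line])

def fix_tables (lines : List String) : List String := fixTablesOuter lines.length lines []

-- ===== PORT B =====
/-- B pass 1, inner scan: index `j` after the `while j < n` search loop (the break index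
    of the matching `\end{tabular}`, or `n` if none); fuel as above. -/
def pvScanEnd (lines : List String) : Nat → Nat → Int → Nat
  | 0, j, _ => j
  | fuel + 1, j, depth =>
    if h : j < lines.length then
      let depth := if PySem.Str.isIn pvBEGIN lines[j] then depth + 1 else depth
      if PySem.Str.isIn pvEND lines[j] then
        if depth - 1 = 0 then j else pvScanEnd lines fuel (j + 1) (depth - 1)
      else pvScanEnd lines fuel (j + 1) depth
    else j

/-- B pass 1: the span table of top-level tabular blocks to wrap; `prevClose` is the
    index of the last line after which a `}%` will be emitted (initially -2). -/
def pvFindSpans (lines : List String) : Nat → Nat → Int → List (Nat × Option Nat)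
  | 0, _, _ => []
  | fuel + 1, i, prevClose =>
    if h : i < lines.length then
      if PySem.Str.isIn pvBEGIN (PySem.Str.strip lines[i]) then
        if decide (0 < i) && decide (prevClose ≠ (i : Int) - 1)
            && PySem.Str.isIn pvRESIZE (lines.getD (i - 1) "") then
          pvFindSpans lines fuel (i + 1) prevClose      -- already wrapped: skip
        else
          let j := pvScanEnd lines lines.length (i + 1) 1
          if j < lines.length then (i, some j) :: pvFindSpans lines fuel (j + 1) (j : Int)
          else [(i, none)]                              -- unterminated block
      else pvFindSpans lines fuel (i + 1) prevClose
    else []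

/-- B pass 2: rebuild the output from slices of `lines` around the recorded spans. -/
def pvEmit (lines : List String) : List (Nat × Option Nat) → Nat → List String
  | [], pos => PySem.List.slice lines (some (pos : Int)) none
  | (s, e) :: rest, pos =>
    PySem.List.slice lines (some (pos : Int)) (some (s : Int)) ++ [pvWRAP] ++
    (match e with
     | none => PySem.List.slice lines (some (s : Int)) none
     | some j =>
        PySem.List.slice lines (some (s : Int)) (some ((j : Int) + 1)) ++ [pvCLOSE] ++
        pvEmit lines rest (j + 1))

def fix_tables_alt (lines : List String) : List String :=
  pvEmit lines (pvFindSpans lines lines.length 0 (-2)) 0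

-- ===== PRECONDITION & SPEC =====
def Spec_fix_tables (lines : List String) (out : List String) : Prop := out = fix_tables_alt lines
instance (lines : List String) (out : List String) : Decidable (Spec_fix_tables lines out) := by unfold Spec_fix_tables; infer_instance

-- ===== CLAIM (what is proved, stated in full; the proofs are below) =====
def Claim_equal_fix_tables : Prop := ∀ (lines : List String), Dom_fix_tables lines → Spec_fix_tables lines (fix_tables lines)

-- ===== LEMMAS AND PROOFS =====
def pvFindEnd : List String → Int → Option Nat
  | [], _ => none
  | l :: rest, depth =>
    let depth := if PySem.Str.isIn pvBEGIN l then depth + 1 else depth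
    if PySem.Str.isIn pvEND l then
      if depth - 1 = 0 then some 0 else (pvFindEnd rest (depth - 1)).map (· + 1)
    else (pvFindEnd rest depth).map (· + 1)

def pvR : List String → Bool → List String
  | [], _ => []
  | l :: rest, p =>
    if PySem.Str.isIn pvBEGIN (PySem.Str.strip l) && !p then
      pvWRAP :: l ::
        (match pvFindEnd rest 1 with
         | some k => rest.take (k + 1) ++ [pvCLOSE] ++ pvR (rest.drop (k + 1)) false
         | none => rest)
    else l :: pvR rest (PySem.Str.isIn pvRESIZE l)
termination_by rem _ => rem.length
decreasing_by
  · simp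
  · simp

lemma pvMatchShift (F : Option Nat) (j L : Nat) :
    (match F.map (· + 1) with | some k => j + k | none => L) =
      (match F with | some k => j + 1 + k | none => L) := by
  cases F with
  | none => rfl
  | some k => show j + (k + 1) = j + 1 + k; omega

lemma pvFindEnd_lt : ∀ (rem : List String) (d : Int) (k : Nat),
    pvFindEnd rem d = some k → k < rem.length := by
  intro rem
  induction rem with
  | nil => intro d k h; simp [pvFindEnd] at h
  | cons l rest ih =>
    intro d k h
    simp only [pvFindEnd] at h
    split_ifs at h <;>
      first
        | (simp only [Option.some.injEq] at h; simp only [List.length_cons]; omega)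
        | (simp only [Option.map_eq_some_iff] at h
           obtain ⟨k', hk', rfl⟩ := h
           have := ih _ _ hk'; simp only [List.length_cons]; omega)

lemma fixTablesInner_snd_le : ∀ (rem res : List String) (d : Int),
    (fixTablesInner rem res d).2.length ≤ rem.length := by
  intro rem res d
  fun_induction fixTablesInner rem res d
  all_goals simp_all
  all_goals omega

lemma fixTablesInner_eq : ∀ (rem res : List String) (d : Int),
    fixTablesInner rem res d =
      match pvFindEnd rem d with
      | some k => (res ++ rem.take (k + 1) ++ [pvCLOSE], rem.drop (k + 1))
      | none => (res ++ rem, []) := by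
  intro rem
  induction rem with
  | nil => intro res d; simp [fixTablesInner, pvFindEnd]
  | cons l rest ih =>
    intro res d
    simp only [fixTablesInner, pvFindEnd]
    generalize (if PySem.Str.isIn pvBEGIN l = true then d + 1 else d) = d'
    split_ifs with he hd
    · simp
    · rw [ih]; cases h : pvFindEnd rest (d' - 1) <;> simp
    · rw [ih]; cases h : pvFindEnd rest d' <;> simp

lemma fixTablesOuter_eq : ∀ (fuel : Nat) (rem res : List String), rem.length ≤ fuel →
    fixTablesOuter fuel rem res =
      res ++ pvR rem (decide (0 < res.length) && PySem.Str.isIn pvRESIZE (res.getLast?.getD "")) := by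
  intro fuel
  induction fuel with
  | zero =>
    intro rem res hlen
    have : rem = [] := by cases rem <;> simp_all
    subst this
    simp [fixTablesOuter, pvR]
  | succ fuel ih =>
    intro rem res hlen
    cases rem with
    | nil => simp [fixTablesOuter, pvR]
    | cons line rest =>
      have hrest : rest.length ≤ fuel := by simp at hlen; omega
      simp only [fixTablesOuter]
      by_cases hb : PySem.Str.isIn pvBEGIN (PySem.Str.strip line) = true
      · rw [if_pos hb]
        by_cases hw : (decide (0 < res.length) && PySem.Str.isIn pvRESIZE (res.getLast?.getD "")) = true
        · -- already wrapped: the line is copied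
          rw [if_pos hw, ih rest (res ++ [line]) hrest, pvR]
          have hcond : (PySem.Str.isIn pvBEGIN (PySem.Str.strip line)
              && !(decide (0 < res.length) && PySem.Str.isIn pvRESIZE (res.getLast?.getD ""))) = false := by
            rw [hb, hw]; rfl
          rw [hcond]
          have hlast : ((res ++ [line]).getLast?.getD "") = line := by simp
          simp
        · -- wrap this block via the inner loop
          rw [if_neg hw]
          rw [ih _ _ (le_trans (fixTablesInner_snd_le rest (res ++ [pvWRAP, line]) 1) hrest)]
          rw [fixTablesInner_eq, pvR]
          have hw' : (decide (0 < res.length) && PySem.Str.isIn pvRESIZE (res.getLast?.getD "")) = false := by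
            revert hw; cases (decide (0 < res.length) && PySem.Str.isIn pvRESIZE (res.getLast?.getD "")) <;> simp
          have hcond : (PySem.Str.isIn pvBEGIN (PySem.Str.strip line)
              && !(decide (0 < res.length) && PySem.Str.isIn pvRESIZE (res.getLast?.getD ""))) = true := by
            rw [hb, hw']; rfl
          rw [hcond]
          cases h : pvFindEnd rest 1 with
          | some k =>
            simp only []
            have hcl : ((line :: (List.take (k + 1) rest ++ [pvCLOSE])).getLast?.getD (res.getLast?.getD "")) = pvCLOSE := by
              rw [← List.cons_append, List.getLast?_concat]; rfl
            simp [hcl, show PySem.Chars.isIn pvRESIZE.toList pvCLOSE.toList = false from by decide]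
          | none =>
            simp only []
            simp [pvR]
      · rw [if_neg hb, ih rest (res ++ [line]) hrest, pvR]
        have hcond : (PySem.Str.isIn pvBEGIN (PySem.Str.strip line)
            && !(decide (0 < res.length) && PySem.Str.isIn pvRESIZE (res.getLast?.getD ""))) = false := by
          have hb' : PySem.Str.isIn pvBEGIN (PySem.Str.strip line) = false := by
            revert hb; cases PySem.Str.isIn pvBEGIN (PySem.Str.strip line) <;> simp
          rw [hb']; rfl
        rw [hcond]
        have hlast : ((res ++ [line]).getLast?.getD "") = line := by simp
        simp

lemma pvScanEnd_ge (lines : List String) : ∀ (fuel j : Nat) (d : Int),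
    j ≤ pvScanEnd lines fuel j d := by
  intro fuel
  induction fuel with
  | zero => intro j d; simp [pvScanEnd]
  | succ fuel ih =>
    intro j d
    simp only [pvScanEnd]
    split_ifs <;> first | exact le_refl j | exact le_trans (Nat.le_succ j) (ih (j + 1) _)

lemma pvScanEnd_eq (lines : List String) : ∀ (fuel j : Nat) (d : Int),
    lines.length - j ≤ fuel → j ≤ lines.length →
    pvScanEnd lines fuel j d =
      match pvFindEnd (lines.drop j) d with
      | some k => j + k
      | none => lines.length := by
  intro fuel
  induction fuel with
  | zero =>
    intro j d hf hle
    have hj : j = lines.length := by omega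
    rw [List.drop_of_length_le (by omega)]
    simp [pvScanEnd, pvFindEnd, hj]
  | succ fuel ih =>
    intro j d hf hle
    by_cases h : j < lines.length
    · rw [pvScanEnd, dif_pos h, List.drop_eq_getElem_cons h, pvFindEnd]
      cases hB : PySem.Str.isIn pvBEGIN lines[j] <;>
        cases hEq : PySem.Str.isIn pvEND lines[j] <;>
          simp only [Bool.false_eq_true, if_false, if_true]
      · rw [ih (j + 1) d (by omega) (by omega), pvMatchShift]
      · by_cases hz : d - 1 = 0
        · simp only [hz, if_true]; exact (by omega : j = j + 0)
        · simp only [hz, if_false]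
          rw [ih (j + 1) (d - 1) (by omega) (by omega), pvMatchShift]
      · rw [ih (j + 1) (d + 1) (by omega) (by omega), pvMatchShift]
      · by_cases hz : d + 1 - 1 = 0
        · simp only [hz, if_true]; exact (by omega : j = j + 0)
        · simp only [hz, if_false]
          rw [ih (j + 1) (d + 1 - 1) (by omega) (by omega), pvMatchShift]
    · rw [pvScanEnd, dif_neg h]
      rw [List.drop_of_length_le (by omega)]
      simp [pvFindEnd]
      omega

lemma pvFindSpans_start_ge (lines : List String) : ∀ (fuel i : Nat) (pc : Int) (p : Nat × Option Nat),
    p ∈ pvFindSpans lines fuel i pc → i ≤ p.1 := by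
  intro fuel
  induction fuel with
  | zero => intro i pc p hp; simp [pvFindSpans] at hp
  | succ fuel ih =>
    intro i pc p hp
    simp only [pvFindSpans] at hp
    split_ifs at hp with h hb hw hj
    · exact le_trans (by omega) (ih (i + 1) pc p hp)
    · rcases List.mem_cons.mp hp with rfl | hp'
      · simp
      · have := pvScanEnd_ge lines lines.length (i + 1) 1
        exact le_trans (by omega) (ih _ _ p hp')
    · simp at hp; simp [hp]
    · exact le_trans (by omega) (ih (i + 1) pc p hp)
    · simp at hp

lemma pvSliceFrom_cons (lines : List String) (i : Nat) (h : i < lines.length) :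
    PySem.List.slice lines (some (i : Int)) none =
      lines[i] :: PySem.List.slice lines (some ((i + 1 : Nat) : Int)) none := by
  rw [PySem.List.slice_from_natCast, PySem.List.slice_from_natCast, List.drop_eq_getElem_cons h]

lemma pvSlice_cons (lines : List String) (i s : Nat) (h : i < lines.length) (hs : i < s) :
    PySem.List.slice lines (some (i : Int)) (some (s : Int)) =
      lines[i] :: PySem.List.slice lines (some ((i + 1 : Nat) : Int)) (some (s : Int)) := by
  rw [PySem.List.slice_natCast, PySem.List.slice_natCast, List.drop_eq_getElem_cons h]
  rw [show s - i = (s - (i + 1)) + 1 by omega]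
  rfl

lemma pvEmit_cons (lines : List String) (S : List (Nat × Option Nat)) (i : Nat)
    (h : i < lines.length) (hS : ∀ p ∈ S, i + 1 ≤ p.1) :
    pvEmit lines S i = lines[i] :: pvEmit lines S (i + 1) := by
  cases S with
  | nil => simp only [pvEmit]; exact pvSliceFrom_cons lines i h
  | cons p rest =>
    obtain ⟨s, e⟩ := p
    simp only [pvEmit]
    have hs : i < s := by have := hS (s, e) (by simp); simpa using this
    rw [pvSlice_cons lines i s h hs]
    simp [List.append_assoc]

lemma pvEmit_findSpans (lines : List String) : ∀ (fuel i : Nat) (pc : Int),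
    lines.length - i ≤ fuel → pc ≤ (i : Int) - 1 →
    pvEmit lines (pvFindSpans lines fuel i pc) i =
      pvR (lines.drop i)
        (decide (0 < i) && decide (pc ≠ (i : Int) - 1)
          && PySem.Str.isIn pvRESIZE (lines.getD (i - 1) "")) := by
  intro fuel
  induction fuel with
  | zero =>
    intro i pc hf hpc
    have hn : lines.length ≤ i := by omega
    rw [List.drop_of_length_le hn]
    simp only [pvFindSpans, pvEmit, pvR]
    rw [PySem.List.slice_from_natCast, List.drop_of_length_le hn]
  | succ fuel ih =>
    intro i pc hf hpc
    by_cases h : i < lines.length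
    · have hdrop : lines.drop i = lines[i] :: lines.drop (i + 1) := List.drop_eq_getElem_cons h
      have hP1 : (decide (0 < i + 1)) = true := by simp
      have hgetD : lines.getD ((i + 1) - 1) "" = lines[i] := by
        simp [List.getD, List.getElem?_eq_getElem h]
      rw [pvFindSpans, dif_pos h]
      cases hb : PySem.Str.isIn pvBEGIN (PySem.Str.strip lines[i]) with
      | false =>
        -- plain line: copied
        simp only [Bool.false_eq_true, if_false]
        rw [pvEmit_cons lines _ i h (fun p hp => pvFindSpans_start_ge lines fuel (i + 1) pc p hp)]
        rw [ih (i + 1) pc (by omega) (by omega)]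
        rw [hdrop, pvR]
        simp only [hb, Bool.false_and, Bool.false_eq_true, if_false]
        congr 1
        have hne : (decide (pc ≠ ((i : Int) + 1) - 1)) = true := by
          simp; omega
        rw [hgetD]
        push_cast
        rw [hne, hP1]
        simp
      | true =>
        cases hw : (decide (0 < i) && decide (pc ≠ (i : Int) - 1)
            && PySem.Str.isIn pvRESIZE (lines.getD (i - 1) "")) with
        | true =>
          -- already wrapped: copied
          simp only [if_true]
          rw [pvEmit_cons lines _ i h (fun p hp => pvFindSpans_start_ge lines fuel (i + 1) pc p hp)]
          rw [ih (i + 1) pc (by omega) (by omega)]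
          rw [hdrop, pvR]
          simp only [hb, Bool.not_true, Bool.and_false, Bool.false_eq_true, if_false]
          congr 1
          have hne : (decide (pc ≠ ((i : Int) + 1) - 1)) = true := by
            simp; omega
          rw [hgetD]
          push_cast
          rw [hne, hP1]
          simp
        | false =>
          -- wrap this block
          simp only [Bool.false_eq_true, if_false]
          have hsc := pvScanEnd_eq lines lines.length (i + 1) 1 (by omega) (by omega)
          cases hfe : pvFindEnd (lines.drop (i + 1)) 1 with
          | some k =>
            have hk : k < (lines.drop (i + 1)).length := pvFindEnd_lt _ _ _ hfe
            have hklen : k < lines.length - (i + 1) := by simpa using hk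
            rw [hfe] at hsc
            simp only at hsc
            rw [hsc]
            have hjlt : i + 1 + k < lines.length := by omega
            simp only [hjlt, if_pos]
            rw [hdrop, pvR]
            simp only [hb, Bool.not_false, Bool.and_true, if_true, hfe]
            simp only [pvEmit]
            have hcast : ((i + 1 + k : Nat) : Int) + 1 = ((i + 1 + k + 1 : Nat) : Int) := by
              push_cast; ring
            rw [hcast]
            rw [ih (i + 1 + k + 1) ((i + 1 + k : Nat) : Int) (by omega) (by push_cast; omega)]
            have hfalse : (decide (((i + 1 + k : Nat) : Int) ≠ ((i + 1 + k + 1 : Nat) : Int) - 1)) = false := by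
              simp
            simp only [hfalse, Bool.and_false, Bool.false_and]
            rw [PySem.List.slice_natCast, PySem.List.slice_natCast]
            have hdd : (lines.drop (i + 1)).drop (k + 1) = lines.drop (i + 1 + k + 1) := by
              rw [List.drop_drop, show i + 1 + (k + 1) = i + 1 + k + 1 from by omega]
            rw [← hdd]
            rw [Nat.sub_self, List.take_zero, List.nil_append, hdrop,
              show i + 1 + k + 1 - i = k + 1 + 1 from by omega, List.take_succ_cons]
            simp
          | none =>
            rw [hfe] at hsc
            simp only at hsc
            rw [hsc]
            simp only [lt_irrefl, if_false, if_true]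
            rw [hdrop, pvR]
            simp only [hb, Bool.not_false, Bool.and_true, if_true, hfe]
            simp only [pvEmit]
            rw [PySem.List.slice_natCast, PySem.List.slice_from_natCast]
            rw [Nat.sub_self, List.take_zero, List.nil_append, hdrop]
            simp
    · rw [pvFindSpans, dif_neg h]
      rw [List.drop_of_length_le (by omega)]
      simp only [pvEmit, pvR]
      rw [PySem.List.slice_from_natCast, List.drop_of_length_le (by omega)]

-- ===== VERDICT (by name: the statement is the Claim_ definition above) =====
theorem fix_tables_spec : Claim_equal_fix_tables := by
  intro lines _
  unfold Spec_fix_tables fix_tables fix_tables_alt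
  rw [fixTablesOuter_eq lines.length lines [] (le_refl _)]
  rw [pvEmit_findSpans lines lines.length 0 (-2) (by omega) (by omega)]
  simp
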